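-- pv_equiv track=rewrite | github.com/dlwlwns52/Algorithm | 프로그래머스/1/176963. 추억 점수/추억 점수.py | solution
-- ===== SOURCE A (Python) =====
-- def solution(name, yearning, photo):
--     answer = []
--     dic = {}
--     total_sum = 0
--
--
--     for i in range(len(name)):
--         dic[name[i]] = yearning[i]
--
--     for i in photo:
--         for k in i:
--             if k in dic:
--                 total_sum += dic[k]
--
--         answer.append(total_sum)
--         total_sum = 0
--
--     return answer
-- ===== SOURCE B (Python) =====
-- def solution(name, yearning, photo):
--     dic = dict(zip(name, yearning))
--     answer = []
--     for ph in photo: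
--         cnt = {}
--         for k in ph:
--             cnt[k] = cnt.get(k, 0) + 1
--         answer.append(sum(dic.get(k, 0) * c for k, c in cnt.items()))
--     return answer
-- ===== Notes on version B (the rewrite author's own statement) =====
-- stated objective: alternative
-- what changed: B builds the dict with dict(zip(name, yearning)) and, per photo, first aggregates a name->frequency map and then sums yearning * frequency over the distinct members, instead of A's running total that looks every member up one by one.
import Mathlib
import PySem

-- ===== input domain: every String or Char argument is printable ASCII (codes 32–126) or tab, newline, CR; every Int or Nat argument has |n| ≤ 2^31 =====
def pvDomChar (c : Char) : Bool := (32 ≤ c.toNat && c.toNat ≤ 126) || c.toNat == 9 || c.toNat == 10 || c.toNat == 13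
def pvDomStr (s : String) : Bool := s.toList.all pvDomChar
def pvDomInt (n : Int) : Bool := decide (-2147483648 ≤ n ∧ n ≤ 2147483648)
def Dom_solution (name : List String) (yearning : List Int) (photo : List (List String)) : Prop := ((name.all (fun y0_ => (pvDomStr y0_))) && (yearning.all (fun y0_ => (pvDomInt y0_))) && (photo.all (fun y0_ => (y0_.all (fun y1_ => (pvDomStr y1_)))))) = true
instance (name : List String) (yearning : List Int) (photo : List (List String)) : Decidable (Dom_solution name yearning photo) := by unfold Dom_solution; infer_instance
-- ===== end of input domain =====

-- B builds the dict from zip(name, yearning) and, per photo, aggregates a frequency map first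
-- and then sums yearning * frequency over the distinct members (objective: alternative).


-- ===== PORT A =====
-- name[i] / yearning[i]: under Pre_ (name.length ≤ yearning.length) both indices are in range,
-- so pyGetD's defaults are never read.
def solution (name : List String) (yearning : List Int) (photo : List (List String)) : List Int :=
  let dic := (PySem.List.pyRange 0 (name.length) 1).foldl
      (fun d i => d.insert (PySem.List.pyGetD name i "") (PySem.List.pyGetD yearning i 0))
      PySem.Dict.empty
  photo.foldl
    (fun answer ph =>
      answer ++ [ph.foldl (fun total_sum k =>
        if dic.contains k then total_sum + dic.getD k 0 else total_sum) 0])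
    []

-- ===== PORT B =====
def solution_alt (name : List String) (yearning : List Int) (photo : List (List String)) : List Int :=
  let dic := PySem.Dict.ofList (name.zip yearning)
  photo.foldl
    (fun answer ph =>
      let cnt := ph.foldl (fun d k => d.insert k (d.getD k 0 + 1)) PySem.Dict.empty
      answer ++ [cnt.items.foldl (fun s p => s + dic.getD p.1 0 * p.2) 0])
    []

-- ===== PRECONDITION & SPEC =====
-- A raises IndexError on yearning[i] when name is longer than yearning; excluded.
def Pre_solution (name : List String) (yearning : List Int) (photo : List (List String)) : Prop :=
  name.length ≤ yearning.length
instance (name : List String) (yearning : List Int) (photo : List (List String)) : Decidable (Pre_solution name yearning photo) := by unfold Pre_solution; infer_instance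
def pvWitness_solution : List String × List Int × List (List String) := (["a", "b"], [1, 2], [["a", "a", "c"], []])

def Spec_solution (name : List String) (yearning : List Int) (photo : List (List String)) (out : List Int) : Prop := out = solution_alt name yearning photo
instance (name : List String) (yearning : List Int) (photo : List (List String)) (out : List Int) : Decidable (Spec_solution name yearning photo out) := by unfold Spec_solution; infer_instance

-- ===== CLAIM (what is proved, stated in full; the proofs are below) =====
def Claim_equal_solution : Prop := ∀ (name : List String) (yearning : List Int) (photo : List (List String)), Dom_solution name yearning photo → Pre_solution name yearning photo → Spec_solution name yearning photo (solution name yearning photo)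

-- ===== LEMMAS AND PROOFS =====

-- Both programs build the same name→yearning dict: index loop over range(len(name)) vs dict(zip(…)).
lemma build_range_eq (name : List String) (yearning : List Int)
    (h : name.length ≤ yearning.length) (d : PySem.Dict String Int) :
    (List.range name.length).foldl
      (fun d k => d.insert (name.getD k "") (yearning.getD k 0)) d
    = (name.zip yearning).foldl (fun d p => d.insert p.1 p.2) d := by
  induction name generalizing yearning d with
  | nil => simp
  | cons x xs ih =>
    cases yearning with
    | nil => simp at h
    | cons y ys =>
      rw [List.length_cons, List.range_succ_eq_map, List.foldl_cons, List.foldl_map]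
      simp only [List.getD_cons_zero, List.getD_cons_succ, List.zip_cons_cons, List.foldl_cons]
      exact ih ys (by simpa using h) _

lemma build_dict_eq (name : List String) (yearning : List Int)
    (h : name.length ≤ yearning.length) :
    (PySem.List.pyRange 0 (name.length) 1).foldl
      (fun d i => d.insert (PySem.List.pyGetD name i "") (PySem.List.pyGetD yearning i 0))
      PySem.Dict.empty
    = PySem.Dict.ofList (name.zip yearning) := by
  rw [PySem.List.pyRange_one, List.foldl_map]
  have hlen : (((name.length : Int)) - 0).toNat = name.length := by omega
  rw [hlen]
  simp only [zero_add, PySem.List.pyGetD_natCast]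
  exact build_range_eq name yearning h _

-- Σ over a nodup key list of g n * [n = k] collapses to g k when k is a key, else 0.
lemma sum_key_indicator (keys : List String) (hn : keys.Nodup) (g : String → Int) (k : String) :
    (keys.map (fun n => g n * (if (k == n) = true then (1 : Int) else 0))).sum
    = if k ∈ keys then g k else 0 := by
  induction keys with
  | nil => simp
  | cons n ns ih =>
    simp only [List.map_cons, List.sum_cons, ih hn.of_cons, List.mem_cons]
    by_cases hk : k = n
    · subst hk
      have : k ∉ ns := (List.nodup_cons.mp hn).1
      simp [this]
    · simp [hk, beq_iff_eq]

-- Core interchange: a scan over the photo's members = a weighted sum over distinct keys.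
lemma scan_eq_count (keys : List String) (hn : keys.Nodup) (g : String → Int) (ph : List String) :
    (ph.map (fun k => if k ∈ keys then g k else 0)).sum
    = (keys.map (fun n => g n * (List.count n ph : Int))).sum := by
  induction ph with
  | nil => simp
  | cons k ph ih =>
    have hc : ∀ n, (List.count n (k :: ph) : Int)
        = (List.count n ph : Int) + (if (k == n) = true then (1 : Int) else 0) := by
      intro n; rw [List.count_cons]
      split <;> push_cast <;> ring
    simp only [List.map_cons, List.sum_cons, ih]
    calc (if k ∈ keys then g k else 0) + (keys.map (fun n => g n * (List.count n ph : Int))).sum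
        = (keys.map (fun n => g n * (if (k == n) = true then (1 : Int) else 0))).sum
          + (keys.map (fun n => g n * (List.count n ph : Int))).sum := by
          rw [sum_key_indicator keys hn g k]
      _ = (keys.map (fun n => g n * (List.count n (k :: ph) : Int))).sum := by
          rw [← List.sum_map_add]
          apply congrArg
          apply List.map_congr_left
          intro n _
          rw [hc n]; ring

-- ===== VERDICT (by name: the statement is the Claim_ definition above) =====
theorem solution_spec : Claim_equal_solution := by
  intro name yearning photo _ hpre
  unfold Spec_solution solution solution_alt
  simp only []
  rw [build_dict_eq name yearning hpre]
  set dic := PySem.Dict.ofList (name.zip yearning) with hdic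
  rw [PySem.List.foldl_append_singleton_eq_map, PySem.List.foldl_append_singleton_eq_map]
  simp only [List.nil_append]
  apply List.map_congr_left
  intro ph _
  -- A's summand: the membership test is redundant because getD defaults to 0
  have hfun : (fun (total_sum : Int) (k : String) =>
      if dic.contains k then total_sum + dic.getD k 0 else total_sum)
      = fun total_sum k => total_sum + dic.getD k 0 := by
    funext t k
    rcases hck : dic.contains k with h | h
    · simp [PySem.Dict.getD_of_not_contains dic 0 hck]
    · simp
  rw [hfun, PySem.List.foldl_add]
  -- B's per-photo counting loop is Counter(ph); its items are (k, count) over the distinct keys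
  rw [PySem.Dict.foldl_insert_getD_add_one_eq_counter, PySem.Dict.items_counter, List.foldl_map,
    PySem.List.foldl_add]
  simp only [zero_add]
  have hmem : ph.map (fun k => dic.getD k 0)
      = ph.map (fun k => if k ∈ PySem.Set.ofList ph then dic.getD k 0 else 0) := by
    apply List.map_congr_left
    intro k hk
    simp [(PySem.Set.mem_ofList ph k).mpr hk]
  rw [hmem, scan_eq_count (PySem.Set.ofList ph) (PySem.Set.nodup_ofList ph) (fun k => dic.getD k 0) ph]
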